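-- pv_equiv track=rewrite | github.com/Bourn23/pageindex-with-contextual-analysis | pageindex/granular/semantic_analyzer.py | _map_paragraphs_to_pages
-- ===== SOURCE A (Python) =====
-- from typing import List, Optional, Tuple, Dict
--
-- def _map_paragraphs_to_pages(paragraphs: List[str], full_text: str,
--                              start_page: int, end_page: int,
--                              page_texts: List[Tuple[str, int]]) -> List[int]:
--     """
--     Map each paragraph to its page number.
--
--     Args:
--         paragraphs: List of paragraph strings
--         full_text: Full section text
--         start_page: Starting page of section (1-indexed)
--         end_page: Ending page of section (1-indexed)
--         page_texts: List of (page_text, token_count) tuples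
--
--     Returns:
--         List of page numbers (1-indexed) for each paragraph
--     """
--     paragraph_pages = []
--
--     # Build cumulative text for each page in the section
--     page_cumulative_text = []
--     cumulative = ""
--     for page_num in range(start_page - 1, end_page):
--         if page_num < len(page_texts):
--             cumulative += page_texts[page_num][0]
--             page_cumulative_text.append((page_num + 1, cumulative))
--
--     # For each paragraph, find which page it belongs to
--     for para in paragraphs:
--         # Find the paragraph in the cumulative text
--         para_position = full_text.find(para)
--
--         if para_position == -1:
--             # Fallback: assign to start page
--             paragraph_pages.append(start_page)
--             continue
--
--         # Find which page this position corresponds to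
--         assigned_page = start_page
--         for page_num, cum_text in page_cumulative_text:
--             if len(cum_text) >= para_position:
--                 assigned_page = page_num
--                 break
--
--         paragraph_pages.append(assigned_page)
--
--     return paragraph_pages
-- ===== SOURCE B (Python) =====
-- from typing import List, Tuple
--
-- def _map_paragraphs_to_pages(paragraphs: List[str], full_text: str,
--                              start_page: int, end_page: int,
--                              page_texts: List[Tuple[str, int]]) -> List[int]:
--     # Staged pipeline: page indices in the section, integer prefix sums of the
--     # page-text lengths (no cumulative string concatenation), then a binary
--     # search per paragraph for the first page whose cumulative length reaches
--     # the paragraph's position in full_text.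
--     idxs = [i for i in range(start_page - 1, end_page) if i < len(page_texts)]
--     lens = [len(page_texts[i][0]) for i in idxs]
--     pref = []
--     s = 0
--     for L in lens:
--         s += L
--         pref.append(s)
--
--     def page_of(q: str) -> int:
--         pos = full_text.find(q)
--         if pos == -1:
--             return start_page
--         lo, hi = 0, len(pref)
--         while lo < hi:
--             mid = (lo + hi) // 2
--             if pref[mid] < pos:
--                 lo = mid + 1
--             else:
--                 hi = mid
--         return idxs[lo] + 1 if lo < len(pref) else start_page
--
--     return [page_of(q) for q in paragraphs]
-- ===== Notes on version B (the rewrite author's own statement) =====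
-- stated objective: alternative
-- what changed: B is a staged pipeline: it collects the section's page indices and integer prefix sums of page-text lengths (instead of A's single fold that concatenates ever-growing cumulative page strings) and locates each paragraph's page by binary search over the prefix sums instead of A's linear scan over cumulative strings; total time is dominated by the shared full_text.find calls, so no measured speed-up is claimed.
import Mathlib
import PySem

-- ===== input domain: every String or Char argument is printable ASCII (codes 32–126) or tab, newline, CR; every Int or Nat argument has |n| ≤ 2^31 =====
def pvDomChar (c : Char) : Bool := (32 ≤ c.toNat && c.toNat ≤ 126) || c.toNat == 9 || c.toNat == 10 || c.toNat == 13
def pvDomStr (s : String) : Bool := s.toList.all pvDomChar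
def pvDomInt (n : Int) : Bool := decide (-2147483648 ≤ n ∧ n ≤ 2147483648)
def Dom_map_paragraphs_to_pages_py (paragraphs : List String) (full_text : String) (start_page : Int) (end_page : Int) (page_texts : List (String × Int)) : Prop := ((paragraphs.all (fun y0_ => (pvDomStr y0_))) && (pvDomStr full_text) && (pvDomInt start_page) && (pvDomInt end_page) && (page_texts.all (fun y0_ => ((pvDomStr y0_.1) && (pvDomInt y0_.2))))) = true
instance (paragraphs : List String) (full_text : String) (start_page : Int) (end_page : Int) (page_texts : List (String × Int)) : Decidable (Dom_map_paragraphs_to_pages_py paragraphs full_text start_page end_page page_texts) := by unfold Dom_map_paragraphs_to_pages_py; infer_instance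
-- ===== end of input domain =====

-- B replaces A's single fold concatenating cumulative page strings by a staged pipeline
-- (page indices, integer prefix sums of page lengths) and the per-paragraph linear page
-- scan by a binary search (objective: alternative; no speed claim).

-- ===== PORT A =====
-- the inner 'for page_num, cum_text in page_cumulative_text: if len(cum_text) >= para_position: …; break'
def pvAFind (pct : List (Int × String)) (pos : Int) (sp : Int) : Int :=
  match pct with
  | [] => sp
  | (num, cum) :: rest => if pos ≤ PySem.Str.len cum then num else pvAFind rest pos sp

def map_paragraphs_to_pages_py (paragraphs : List String) (full_text : String) (start_page : Int) (end_page : Int) (page_texts : List (String × Int)) : List Int :=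
  -- build page_cumulative_text: state = (page_cumulative_text, cumulative)
  let st :=
    (PySem.List.pyRange (start_page - 1) end_page 1).foldl
      (fun (st : List (Int × String) × String) page_num =>
        if page_num < PySem.List.len page_texts then
          match PySem.List.pyGet? page_texts page_num with
          | some pt => (st.1 ++ [(page_num + 1, st.2 ++ pt.1)], st.2 ++ pt.1)
          | none => st   -- IndexError in Python: excluded by Pre_
        else st) ([], "")
  let pct := st.1
  paragraphs.foldl (fun acc para =>
    let pos := PySem.Str.find full_text para
    if pos = -1 then acc ++ [start_page]
    else acc ++ [pvAFind pct pos start_page]) []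

-- ===== PORT B =====
-- the hand-written bisect loop of Source B: first index in [lo,hi) whose prefix length is ≥ pos
def pvBisect (pref : List Int) (pos : Int) (lo hi : Nat) : Nat :=
  if _h : lo < hi then
    let mid := (lo + hi) / 2      -- (lo+hi)//2 on nonnegative ints: Nat division is exact here
    if pref.getD mid 0 < pos then pvBisect pref pos (mid + 1) hi
    else pvBisect pref pos lo mid
  else lo
termination_by hi - lo
decreasing_by all_goals omega

def map_paragraphs_to_pages_py_alt (paragraphs : List String) (full_text : String) (start_page : Int) (end_page : Int) (page_texts : List (String × Int)) : List Int :=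
  let idxs := (PySem.List.pyRange (start_page - 1) end_page 1).filter
      (fun i => decide (i < PySem.List.len page_texts))
  let lens := idxs.map (fun i =>
      match PySem.List.pyGet? page_texts i with
      | some pt => PySem.Str.len pt.1
      | none => 0)   -- IndexError in Python: excluded by Pre_
  let pref := (lens.foldl (fun (st : List Int × Int) L => (st.1 ++ [st.2 + L], st.2 + L)) ([], 0)).1
  paragraphs.map (fun q =>
    let pos := PySem.Str.find full_text q
    if pos = -1 then start_page
    else
      let lo := pvBisect pref pos 0 pref.length
      if lo < pref.length then idxs.getD lo 0 + 1 else start_page)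

-- ===== PRECONDITION & SPEC =====
-- Pre_ excludes exactly the inputs where Python A raises IndexError (page_texts[page_num]
-- with page_num below -len(page_texts), reached iff the page range is nonempty and starts there);
-- B raises identically on those inputs.
def Pre_map_paragraphs_to_pages_py (paragraphs : List String) (full_text : String) (start_page : Int) (end_page : Int) (page_texts : List (String × Int)) : Prop :=
  end_page ≤ start_page - 1 ∨ -(PySem.List.len page_texts) ≤ start_page - 1
instance (paragraphs : List String) (full_text : String) (start_page : Int) (end_page : Int) (page_texts : List (String × Int)) : Decidable (Pre_map_paragraphs_to_pages_py paragraphs full_text start_page end_page page_texts) := by unfold Pre_map_paragraphs_to_pages_py; infer_instance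

def pvWitness_map_paragraphs_to_pages_py : List String × String × Int × Int × (List (String × Int)) :=
  (["cd", "zz"], "abcd", 1, 2, [("ab", 1), ("cd", 1)])

def Spec_map_paragraphs_to_pages_py (paragraphs : List String) (full_text : String) (start_page : Int) (end_page : Int) (page_texts : List (String × Int)) (out : List Int) : Prop := out = map_paragraphs_to_pages_py_alt paragraphs full_text start_page end_page page_texts
instance (paragraphs : List String) (full_text : String) (start_page : Int) (end_page : Int) (page_texts : List (String × Int)) (out : List Int) : Decidable (Spec_map_paragraphs_to_pages_py paragraphs full_text start_page end_page page_texts out) := by unfold Spec_map_paragraphs_to_pages_py; infer_instance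

-- ===== CLAIM (what is proved, stated in full; the proofs are below) =====
def Claim_equal_map_paragraphs_to_pages_py : Prop := ∀ (paragraphs : List String) (full_text : String) (start_page : Int) (end_page : Int) (page_texts : List (String × Int)), Dom_map_paragraphs_to_pages_py paragraphs full_text start_page end_page page_texts → Pre_map_paragraphs_to_pages_py paragraphs full_text start_page end_page page_texts → Spec_map_paragraphs_to_pages_py paragraphs full_text start_page end_page page_texts (map_paragraphs_to_pages_py paragraphs full_text start_page end_page page_texts)

-- ===== LEMMAS AND PROOFS =====

-- the text of page i (used only in the proofs, to state closed forms of both builds)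
def pvText (page_texts : List (String × Int)) (i : Int) : String :=
  match PySem.List.pyGet? page_texts i with | some pt => pt.1 | none => ""

-- closed form of A's cumulative-string build over an (already filtered) index list
def pvACum (page_texts : List (String × Int)) : List Int → String → List (Int × String)
  | [], _ => []
  | i :: is, c => (i + 1, c ++ pvText page_texts i) :: pvACum page_texts is (c ++ pvText page_texts i)

def pvAEnd (page_texts : List (String × Int)) : List Int → String → String
  | [], c => c
  | i :: is, c => pvAEnd page_texts is (c ++ pvText page_texts i)

-- closed form of B's prefix-sum loop
def pvPrefixOf : List Int → Int → List Int
  | [], _ => []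
  | L :: ls, s => (s + L) :: pvPrefixOf ls (s + L)

def pvSum : List Int → Int → Int
  | [], s => s
  | L :: ls, s => pvSum ls (s + L)

theorem pvA_closed (page_texts : List (String × Int)) :
    ∀ (r : List Int) (al : List (Int × String)) (ac : String),
    (∀ i ∈ r, i < PySem.List.len page_texts → (PySem.List.pyGet? page_texts i).isSome) →
    r.foldl
      (fun (st : List (Int × String) × String) page_num =>
        if page_num < PySem.List.len page_texts then
          match PySem.List.pyGet? page_texts page_num with
          | some pt => (st.1 ++ [(page_num + 1, st.2 ++ pt.1)], st.2 ++ pt.1)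
          | none => st
        else st) (al, ac)
    = (al ++ pvACum page_texts (r.filter (fun i => decide (i < PySem.List.len page_texts))) ac,
       pvAEnd page_texts (r.filter (fun i => decide (i < PySem.List.len page_texts))) ac) := by
  intro r
  induction r with
  | nil => intro al ac _; simp [pvACum, pvAEnd]
  | cons x xs ih =>
      intro al ac h
      simp only [List.foldl_cons, List.filter_cons]
      by_cases hx : x < PySem.List.len page_texts
      · have hs := h x (List.mem_cons_self) hx
        cases hg : PySem.List.pyGet? page_texts x with
        | none => rw [hg] at hs; simp at hs
        | some pt =>
            have ht : pvText page_texts x = pt.1 := by simp [pvText, hg]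
            simp only [hx, decide_true, if_true, hg, pvACum, pvAEnd, ht]
            rw [ih (al ++ [(x + 1, ac ++ pt.1)]) (ac ++ pt.1)
              (fun i hi hlt => h i (List.mem_cons_of_mem _ hi) hlt)]
            simp
      · simp only [if_neg hx, hx, decide_false]
        exact ih al ac (fun i hi hlt => h i (List.mem_cons_of_mem _ hi) hlt)

theorem pvACum_fst (page_texts : List (String × Int)) :
    ∀ (q : List Int) (c : String),
    (pvACum page_texts q c).map Prod.fst = q.map (· + 1) := by
  intro q
  induction q with
  | nil => intro c; simp [pvACum]
  | cons i is ih => intro c; simp [pvACum, ih]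

theorem pvACum_len (page_texts : List (String × Int)) :
    ∀ (q : List Int) (c : String),
    (pvACum page_texts q c).map (fun p => PySem.Str.len p.2)
      = pvPrefixOf (q.map (fun i => PySem.Str.len (pvText page_texts i))) (PySem.Str.len c) := by
  intro q
  induction q with
  | nil => intro c; simp [pvACum, pvPrefixOf]
  | cons i is ih =>
      intro c
      simp only [pvACum, List.map_cons, pvPrefixOf, ih, PySem.Str.len_append]

theorem pvPref_closed :
    ∀ (ls : List Int) (p0 : List Int) (s0 : Int),
    ls.foldl (fun (st : List Int × Int) L => (st.1 ++ [st.2 + L], st.2 + L)) (p0, s0)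
      = (p0 ++ pvPrefixOf ls s0, pvSum ls s0) := by
  intro ls
  induction ls with
  | nil => intro p0 s0; simp [pvPrefixOf, pvSum]
  | cons L ls ih =>
      intro p0 s0
      simp only [List.foldl_cons, pvPrefixOf, pvSum, ih]
      simp

theorem pvPrefixOf_lb :
    ∀ (ls : List Int) (s : Int), (∀ L ∈ ls, 0 ≤ L) →
    ∀ x ∈ pvPrefixOf ls s, s ≤ x := by
  intro ls
  induction ls with
  | nil => intro s _ x hx; simp [pvPrefixOf] at hx
  | cons L ls ih =>
      intro s h x hx
      have hL : 0 ≤ L := h L (List.mem_cons_self)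
      simp only [pvPrefixOf, List.mem_cons] at hx
      rcases hx with rfl | hx
      · omega
      · have := ih (s + L) (fun y hy => h y (List.mem_cons_of_mem _ hy)) x hx
        omega

theorem pvPrefixOf_pairwise :
    ∀ (ls : List Int) (s : Int), (∀ L ∈ ls, 0 ≤ L) →
    (pvPrefixOf ls s).Pairwise (· ≤ ·) := by
  intro ls
  induction ls with
  | nil => intro s _; simp [pvPrefixOf]
  | cons L ls ih =>
      intro s h
      simp only [pvPrefixOf, List.pairwise_cons]
      refine ⟨fun x hx => pvPrefixOf_lb ls (s + L) (fun y hy => h y (List.mem_cons_of_mem _ hy)) x hx,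
        ih (s + L) (fun y hy => h y (List.mem_cons_of_mem _ hy))⟩

theorem pvPrefixOf_length : ∀ (ls : List Int) (s : Int), (pvPrefixOf ls s).length = ls.length := by
  intro ls
  induction ls with
  | nil => intro s; simp [pvPrefixOf]
  | cons L ls ih => intro s; simp [pvPrefixOf, ih]

-- Pairwise order gives index-wise monotonicity of getD
theorem pvPairwise_getD (l : List Int) (hp : l.Pairwise (· ≤ ·)) :
    ∀ i j : Nat, i ≤ j → j < l.length → l.getD i 0 ≤ l.getD j 0 := by
  intro i j hij hj
  rcases Nat.lt_or_ge i j with h | h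
  · have hi : i < l.length := by omega
    rw [List.getD_eq_getElem l 0 hi, List.getD_eq_getElem l 0 hj]
    exact (List.pairwise_iff_getElem.mp hp) i j hi hj h
  · have : i = j := by omega
    subst this; rfl

-- what pvBisect computes on a non-decreasing list: the first index in [lo,hi) whose entry is ≥ pos
theorem pvBisect_spec (p : List Int) (pos : Int)
    (hmono : ∀ i j : Nat, i ≤ j → j < p.length → p.getD i 0 ≤ p.getD j 0) :
    ∀ (d lo hi : Nat), hi - lo ≤ d → lo ≤ hi → hi ≤ p.length →
      lo ≤ pvBisect p pos lo hi ∧ pvBisect p pos lo hi ≤ hi ∧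
      (∀ i, i < pvBisect p pos lo hi → lo ≤ i → p.getD i 0 < pos) ∧
      (pvBisect p pos lo hi < hi → ¬ p.getD (pvBisect p pos lo hi) 0 < pos) := by
  intro d
  induction d with
  | zero =>
      intro lo hi hd hle _
      have heq : lo = hi := by omega
      subst heq
      have hb : pvBisect p pos lo lo = lo := by rw [pvBisect]; simp
      rw [hb]
      exact ⟨le_refl _, le_refl _, fun i h1 h2 => absurd h1 (by omega), fun h => absurd h (by omega)⟩
  | succ d ih =>
      intro lo hi hd hle hhi
      rw [pvBisect]
      by_cases h : lo < hi
      · simp only [dif_pos h]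
        by_cases hm : p.getD ((lo + hi) / 2) 0 < pos
        · simp only [if_pos hm]
          obtain ⟨h1, h2, h3, h4⟩ := ih ((lo + hi) / 2 + 1) hi (by omega) (by omega) hhi
          refine ⟨by omega, h2, ?_, h4⟩
          intro i hi1 hi2
          by_cases hc : (lo + hi) / 2 + 1 ≤ i
          · exact h3 i hi1 hc
          · have hmid : (lo + hi) / 2 < p.length := by omega
            have := hmono i ((lo + hi) / 2) (by omega) hmid
            omega
        · simp only [if_neg hm]
          obtain ⟨h1, h2, h3, h4⟩ := ih lo ((lo + hi) / 2) (by omega) (by omega) (by omega)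
          refine ⟨h1, by omega, h3, ?_⟩
          intro hr
          rcases Nat.lt_or_ge (pvBisect p pos lo ((lo + hi) / 2)) ((lo + hi) / 2) with hc | hc
          · exact h4 hc
          · have : pvBisect p pos lo ((lo + hi) / 2) = (lo + hi) / 2 := by omega
            rw [this]; exact hm
      · simp only [dif_neg h]
        exact ⟨le_refl _, by omega, fun i h1 h2 => absurd h1 (by omega), fun hc => absurd hc h⟩

-- A's linear first-match scan agrees with any index r characterised as "first entry ≥ pos"
theorem pvAFind_eq (pos sp : Int) :
    ∀ (pct : List (Int × String)) (r : Nat),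
    r ≤ pct.length →
    (∀ i, i < r → (pct.map (fun p => PySem.Str.len p.2)).getD i 0 < pos) →
    (r < pct.length → ¬ (pct.map (fun p => PySem.Str.len p.2)).getD r 0 < pos) →
    pvAFind pct pos sp = if r < pct.length then (pct.map Prod.fst).getD r 0 else sp := by
  intro pct
  induction pct with
  | nil =>
      intro r h1 _ _
      have : ¬ r < ([] : List (Int × String)).length := by simp
      rw [pvAFind, if_neg this]
  | cons hd tl ih =>
      intro r h1 h2 h3
      obtain ⟨num, cum⟩ := hd
      cases r with
      | zero =>
          have hlt : 0 < ((num, cum) :: tl).length := by simp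
          have := h3 hlt
          simp only [List.map_cons, List.getD_cons_zero] at this
          rw [pvAFind, if_pos (by omega), if_pos hlt]
          simp
      | succ r' =>
          have hh := h2 0 (Nat.succ_pos r')
          simp only [List.map_cons, List.getD_cons_zero] at hh
          rw [pvAFind, if_neg (by omega)]
          have := ih r' (by simpa using h1)
            (fun i hi => by simpa using h2 (i + 1) (by omega))
            (fun hr => by simpa using h3 (by simpa using Nat.succ_lt_succ hr))
          rw [this]
          by_cases hc : r' < tl.length
          · rw [if_pos hc, if_pos (by simpa using Nat.succ_lt_succ hc)]
            simp
          · rw [if_neg hc, if_neg (by simp; omega)]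

theorem pvIte_append {α : Type} (c : Prop) [Decidable c] (acc : List α) (x y : α) :
    (if c then acc ++ [x] else acc ++ [y]) = acc ++ [if c then x else y] := by
  split <;> rfl

-- A's paragraph fold with 'acc ++ [·]' is a map
theorem pvFoldl_append_map {α β : Type} (f : α → β) :
    ∀ (xs : List α) (acc : List β),
    xs.foldl (fun a x => a ++ [f x]) acc = acc ++ xs.map f := by
  intro xs
  induction xs with
  | nil => intro acc; simp
  | cons x xs ih => intro acc; simp [ih]

-- ===== VERDICT (by name: the statement is the Claim_ definition above) =====
theorem map_paragraphs_to_pages_py_spec : Claim_equal_map_paragraphs_to_pages_py := by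
  intro paragraphs full_text start_page end_page page_texts _dom hpre
  unfold Spec_map_paragraphs_to_pages_py
  simp only [map_paragraphs_to_pages_py, map_paragraphs_to_pages_py_alt]
  -- every index the build loop touches is a valid (possibly negative) Python index
  have hsome : ∀ i ∈ PySem.List.pyRange (start_page - 1) end_page 1,
      i < PySem.List.len page_texts → (PySem.List.pyGet? page_texts i).isSome := by
    intro i hi hlt
    rcases hpre with hp | hp
    · rw [PySem.List.pyRange_one_eq_nil (by omega)] at hi
      simp at hi
    · have hmem := (PySem.List.mem_pyRange_one.mp hi).1
      cases hg : PySem.List.pyGet? page_texts i with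
      | some _ => simp
      | none =>
          have hnot := (PySem.List.pyGet?_eq_none_iff page_texts i).mp hg
          simp only [PySem.Raise.InRange, PySem.List.len_eq, not_and, not_lt, not_le] at hnot
          simp only [PySem.List.len_eq] at hp hlt
          omega
  rw [pvA_closed page_texts _ [] "" hsome]
  set q := (PySem.List.pyRange (start_page - 1) end_page 1).filter
      (fun i => decide (i < PySem.List.len page_texts)) with hq
  -- B's lens agree with the proof-side pvText lengths
  have hlens : q.map (fun i =>
      match PySem.List.pyGet? page_texts i with
      | some pt => PySem.Str.len pt.1
      | none => (0 : Int))
      = q.map (fun i => PySem.Str.len (pvText page_texts i)) := by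
    apply List.map_congr_left
    intro i hi
    have hi' := List.mem_of_mem_filter hi
    have hlt : i < PySem.List.len page_texts := by
      have := List.of_mem_filter hi; simpa using this
    have := hsome i hi' hlt
    cases hg : PySem.List.pyGet? page_texts i with
    | none => rw [hg] at this; simp at this
    | some pt => simp [pvText, hg]
  rw [hlens, pvPref_closed]
  simp only [List.nil_append]
  set lens := q.map (fun i => PySem.Str.len (pvText page_texts i)) with hlensdef
  set pref := pvPrefixOf lens 0 with hpref
  set pct := pvACum page_texts q "" with hpct
  have hlen0 : PySem.Str.len "" = 0 := by decide
  have hpf : pct.map (fun p => PySem.Str.len p.2) = pref := by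
    rw [hpct, pvACum_len, hlen0]
  have hfst : pct.map Prod.fst = q.map (· + 1) := pvACum_fst page_texts q ""
  have hlennn : pct.length = pref.length := by
    have := congrArg List.length hpf; simpa using this
  have hql : q.length = pref.length := by
    have : lens.length = q.length := by simp [hlensdef]
    have h2 : pref.length = lens.length := by
      rw [hpref, pvPrefixOf_length]
    omega
  have hnonneg : ∀ L ∈ lens, 0 ≤ L := by
    intro L hL
    rw [hlensdef] at hL
    simp only [List.mem_map] at hL
    obtain ⟨i, _, rfl⟩ := hL
    rw [PySem.Str.len_eq]; positivity
  have hmono := pvPairwise_getD pref (by rw [hpref]; exact pvPrefixOf_pairwise lens 0 hnonneg)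
  have hstep : (fun (acc : List Int) para =>
      let pos := PySem.Str.find full_text para
      if pos = -1 then acc ++ [start_page] else acc ++ [pvAFind pct pos start_page])
    = (fun (acc : List Int) para => acc ++ [
        let pos := PySem.Str.find full_text para
        if pos = -1 then start_page else pvAFind pct pos start_page]) := by
    funext acc para
    exact pvIte_append _ _ _ _
  rw [hstep, pvFoldl_append_map, List.nil_append]
  apply List.map_congr_left
  intro para _
  simp only [PySem.Str.find]
  by_cases hpos : PySem.Chars.find full_text.toList para.toList = -1
  · simp only [if_pos hpos]
  · simp only [if_neg hpos]
    set pos := PySem.Chars.find full_text.toList para.toList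
    obtain ⟨b1, b2, b3, b4⟩ := pvBisect_spec pref pos hmono pref.length 0 pref.length
      (le_refl _) (Nat.zero_le _) (le_refl _)
    have hAeq := pvAFind_eq pos start_page pct (pvBisect pref pos 0 pref.length)
      (by omega) (fun i hi => by rw [hpf]; exact b3 i hi (Nat.zero_le i))
      (fun hr => by rw [hpf]; exact b4 (by omega))
    rw [hAeq]
    by_cases hc : pvBisect pref pos 0 pref.length < pref.length
    · have hlo : pvBisect pref pos 0 pref.length < q.length := by omega
      rw [if_pos (by omega), if_pos hc, hfst]
      simp [List.getD_eq_getElem, List.getElem?_eq_getElem, hlo]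
    · rw [if_neg (by omega), if_neg hc]
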